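-- pv_equiv track=rewrite | github.com/KimJonghoSNU/Abstraction_gap | src/run_round6_beampack.py | _gate_hit_dag
-- ===== SOURCE A (Python) =====
-- from typing import Any, Dict, List, Optional, Sequence, Set, Tuple
--
-- def _gate_hit_dag(
--     gate_paths: Sequence[Tuple[int, ...]],
--     gold_paths: Sequence[Tuple[int, ...]],
--     leaf_ancestor_paths: Dict[Tuple[int, ...], List[Tuple[int, ...]]],
-- ) -> bool:
--     gate_set = {tuple(p) for p in gate_paths}
--     if not gate_set:
--         return False
--     for gp in gold_paths:
--         gp_t = tuple(gp)
--         if gp_t in gate_set: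
--             return True
--         for anc in leaf_ancestor_paths.get(gp_t, []):
--             if anc in gate_set:
--                 return True
--     return False
-- ===== SOURCE B (Python) =====
-- def _gate_hit_dag(gate_paths, gold_paths, leaf_ancestor_paths):
--     gold_set = {tuple(p) for p in gold_paths}
--     hit = set(gold_set)
--     for key, ancs in leaf_ancestor_paths.items():
--         if key in gold_set:
--             hit.update(ancs)
--     return any(tuple(p) in hit for p in gate_paths)
-- ===== Notes on version B (the rewrite author's own statement) =====
-- stated objective: alternative
-- what changed: B reverses which side is indexed: it iterates the ancestor dictionary's items once, collecting ancestors of gold keys into a hit set seeded with the gold set, and then scans the gate paths for membership in that set, instead of A's scan of gold paths with per-item dict lookups against an indexed gate set with early return.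
import Mathlib
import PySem

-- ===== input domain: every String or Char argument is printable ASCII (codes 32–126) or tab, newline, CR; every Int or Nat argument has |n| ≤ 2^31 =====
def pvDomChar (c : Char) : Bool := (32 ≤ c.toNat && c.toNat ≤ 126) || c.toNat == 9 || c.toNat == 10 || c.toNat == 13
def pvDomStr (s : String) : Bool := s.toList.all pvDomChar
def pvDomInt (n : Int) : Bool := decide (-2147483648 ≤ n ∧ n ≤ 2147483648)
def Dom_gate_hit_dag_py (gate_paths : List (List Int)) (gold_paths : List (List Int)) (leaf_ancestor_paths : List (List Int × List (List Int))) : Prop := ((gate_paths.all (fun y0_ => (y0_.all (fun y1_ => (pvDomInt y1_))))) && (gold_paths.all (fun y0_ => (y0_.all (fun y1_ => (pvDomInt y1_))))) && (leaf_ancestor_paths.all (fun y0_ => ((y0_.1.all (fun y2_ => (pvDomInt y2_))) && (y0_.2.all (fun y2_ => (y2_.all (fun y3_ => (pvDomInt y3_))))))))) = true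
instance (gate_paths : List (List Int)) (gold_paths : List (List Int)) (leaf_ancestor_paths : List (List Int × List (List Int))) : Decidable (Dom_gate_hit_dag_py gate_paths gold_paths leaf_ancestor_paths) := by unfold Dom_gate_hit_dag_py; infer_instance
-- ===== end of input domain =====

-- B reverses which side is indexed: it iterates the ancestor dictionary once, collecting ancestors of gold keys into a hit set seeded with the gold set, then scans the gate paths for membership; alternative structure, same results.
-- ===== PORT A =====
def pvLoopA (gate_set : PySem.Set (List Int)) (leaf_ancestor_paths : List (List Int × List (List Int))) : List (List Int) → Bool
  | [] => false
  | gp :: rest =>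
    if PySem.Set.contains gate_set gp then true
    else if (PySem.Dict.getD (PySem.Dict.mk leaf_ancestor_paths) gp []).any (fun anc => PySem.Set.contains gate_set anc) then true
    else pvLoopA gate_set leaf_ancestor_paths rest

-- literal port of A: build gate_set, early-exit if empty, then scan gold paths with early return
def gate_hit_dag_py (gate_paths : List (List Int)) (gold_paths : List (List Int)) (leaf_ancestor_paths : List (List Int × List (List Int))) : Bool :=
  let gate_set := PySem.Set.ofList gate_paths
  if PySem.Set.len gate_set = 0 then false
  else pvLoopA gate_set leaf_ancestor_paths gold_paths

-- ===== PORT B =====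
-- port of B: seed hit with the gold set, sweep the dict items once adding ancestors of gold keys, then scan gate paths
def gate_hit_dag_py_alt (gate_paths : List (List Int)) (gold_paths : List (List Int)) (leaf_ancestor_paths : List (List Int × List (List Int))) : Bool :=
  let gold_set := PySem.Set.ofList gold_paths
  let hit := leaf_ancestor_paths.foldl
    (fun h kv => if PySem.Set.contains gold_set kv.1 then PySem.Set.update h kv.2 else h) gold_set
  gate_paths.any (fun p => PySem.Set.contains hit p)

-- ===== PRECONDITION & SPEC =====
-- Pre_ excludes association lists with duplicate keys, which represent no Python dict (dict keys are unique);
-- there A's first-match lookup and B's full sweep of the items are both accidental readings of the same non-dict.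
def Pre_gate_hit_dag_py (gate_paths : List (List Int)) (gold_paths : List (List Int)) (leaf_ancestor_paths : List (List Int × List (List Int))) : Prop :=
  (leaf_ancestor_paths.map Prod.fst).Nodup
instance (gate_paths : List (List Int)) (gold_paths : List (List Int)) (leaf_ancestor_paths : List (List Int × List (List Int))) : Decidable (Pre_gate_hit_dag_py gate_paths gold_paths leaf_ancestor_paths) := by unfold Pre_gate_hit_dag_py; infer_instance
def pvWitness_gate_hit_dag_py : List (List Int) × List (List Int) × (List (List Int × List (List Int))) :=
  ([[1]], [[2]], [([2], [[1]])])
def Spec_gate_hit_dag_py (gate_paths : List (List Int)) (gold_paths : List (List Int)) (leaf_ancestor_paths : List (List Int × List (List Int))) (out : Bool) : Prop := out = gate_hit_dag_py_alt gate_paths gold_paths leaf_ancestor_paths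
instance (gate_paths : List (List Int)) (gold_paths : List (List Int)) (leaf_ancestor_paths : List (List Int × List (List Int))) (out : Bool) : Decidable (Spec_gate_hit_dag_py gate_paths gold_paths leaf_ancestor_paths out) := by unfold Spec_gate_hit_dag_py; infer_instance

-- ===== CLAIM =====
def Claim_equal_gate_hit_dag_py : Prop := ∀ (gate_paths : List (List Int)) (gold_paths : List (List Int)) (leaf_ancestor_paths : List (List Int × List (List Int))), Dom_gate_hit_dag_py gate_paths gold_paths leaf_ancestor_paths → Pre_gate_hit_dag_py gate_paths gold_paths leaf_ancestor_paths → Spec_gate_hit_dag_py gate_paths gold_paths leaf_ancestor_paths (gate_hit_dag_py gate_paths gold_paths leaf_ancestor_paths)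

-- ===== LEMMAS AND PROOFS =====

lemma pvLoopA_iff (gs : PySem.Set (List Int)) (laps : List (List Int × List (List Int))) (gold : List (List Int)) :
    pvLoopA gs laps gold = true ↔
      ∃ gp ∈ gold, gp ∈ gs ∨ ∃ anc ∈ PySem.Dict.getD (PySem.Dict.mk laps) gp [], anc ∈ gs := by
  induction gold with
  | nil => simp [pvLoopA]
  | cons gp rest ih =>
    simp only [pvLoopA]
    by_cases h1 : gp ∈ gs
    · rw [if_pos ((PySem.Set.contains_iff gs gp).mpr h1)]
      simp only [true_iff]
      exact ⟨gp, List.mem_cons_self, Or.inl h1⟩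
    · rw [if_neg (by simpa [PySem.Set.contains_iff] using h1)]
      by_cases h2 : ∃ anc ∈ PySem.Dict.getD (PySem.Dict.mk laps) gp [], anc ∈ gs
      · rw [if_pos (by simpa [List.any_eq_true, PySem.Set.contains_iff] using h2)]
        simp only [true_iff]
        rcases h2 with ⟨anc, ha, hm⟩
        exact ⟨gp, List.mem_cons_self, Or.inr ⟨anc, ha, hm⟩⟩
      · rw [if_neg (by simpa [List.any_eq_true, PySem.Set.contains_iff] using h2)]
        rw [ih]
        constructor
        · rintro ⟨g, hg, h⟩; exact ⟨g, List.mem_cons_of_mem _ hg, h⟩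
        · rintro ⟨g, hg, h⟩
          rcases List.mem_cons.mp hg with rfl | hg'
          · rcases h with h | h
            · exact absurd h h1
            · exact absurd h h2
          · exact ⟨g, hg', h⟩

-- first-match getD over the raw association list, under Nodup keys, is exactly membership of an entry
lemma pvGetD_mk_iff (laps : List (List Int × List (List Int))) (hnd : (laps.map Prod.fst).Nodup)
    (gp anc : List Int) :
    anc ∈ PySem.Dict.getD (PySem.Dict.mk laps) gp [] ↔ ∃ kv ∈ laps, kv.1 = gp ∧ anc ∈ kv.2 := by
  induction laps with
  | nil => simp [PySem.Dict.getD, PySem.Dict.get?]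
  | cons kv rest ih =>
    have hnd' : (rest.map Prod.fst).Nodup := (List.nodup_cons.mp hnd).2
    have hnotin : kv.1 ∉ rest.map Prod.fst := (List.nodup_cons.mp hnd).1
    rw [PySem.Dict.getD_eq_get?_getD]
    obtain ⟨k, v⟩ := kv
    rw [PySem.Dict.get?_mk_cons]
    by_cases hk : k = gp
    · subst hk
      simp only [beq_self_eq_true, if_pos, Option.getD_some]
      constructor
      · intro h; exact ⟨(k, v), List.mem_cons_self, rfl, h⟩
      · rintro ⟨⟨k', v'⟩, hmem, rfl, h⟩
        rcases List.mem_cons.mp hmem with heq | hmem'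
        · cases heq; exact h
        · exact absurd (List.mem_map.mpr ⟨(k', v'), hmem', rfl⟩) hnotin
    · rw [if_neg (by simpa using hk)]
      rw [← PySem.Dict.getD_eq_get?_getD, ih hnd']
      constructor
      · rintro ⟨kv', hmem, hkeq, h⟩; exact ⟨kv', List.mem_cons_of_mem _ hmem, hkeq, h⟩
      · rintro ⟨kv', hmem, hkeq, h⟩
        rcases List.mem_cons.mp hmem with heq | hmem'
        · subst heq; exact absurd hkeq hk
        · exact ⟨kv', hmem', hkeq, h⟩

lemma pvHit_mem (gold_set : PySem.Set (List Int)) (laps : List (List Int × List (List Int)))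
    (s : PySem.Set (List Int)) (y : List Int) :
    y ∈ laps.foldl (fun h kv => if PySem.Set.contains gold_set kv.1 then PySem.Set.update h kv.2 else h) s ↔
      y ∈ s ∨ ∃ kv ∈ laps, kv.1 ∈ gold_set ∧ y ∈ kv.2 := by
  induction laps generalizing s with
  | nil => simp
  | cons kv rest ih =>
    simp only [List.foldl_cons, ih, List.mem_cons]
    by_cases hg : kv.1 ∈ gold_set
    · rw [if_pos ((PySem.Set.contains_iff _ _).mpr hg)]
      simp only [PySem.Set.mem_update]
      constructor
      · rintro (( hy | hy) | h)
        · exact Or.inl hy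
        · exact Or.inr ⟨kv, Or.inl rfl, hg, hy⟩
        · rcases h with ⟨kv', hm, h1, h2⟩; exact Or.inr ⟨kv', Or.inr hm, h1, h2⟩
      · rintro (hy | ⟨kv', hm, h1, h2⟩)
        · exact Or.inl (Or.inl hy)
        · rcases hm with rfl | hm'
          · exact Or.inl (Or.inr h2)
          · exact Or.inr ⟨kv', hm', h1, h2⟩
    · rw [if_neg (by simpa [PySem.Set.contains_iff] using hg)]
      constructor
      · rintro (hy | ⟨kv', hm, h1, h2⟩)
        · exact Or.inl hy
        · exact Or.inr ⟨kv', Or.inr hm, h1, h2⟩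
      · rintro (hy | ⟨kv', hm, h1, h2⟩)
        · exact Or.inl hy
        · rcases hm with rfl | hm'
          · exact absurd h1 hg
          · exact Or.inr ⟨kv', hm', h1, h2⟩

lemma alt_iff (gate_paths gold_paths : List (List Int)) (laps : List (List Int × List (List Int))) :
    gate_hit_dag_py_alt gate_paths gold_paths laps = true ↔
      ∃ p ∈ gate_paths, p ∈ gold_paths ∨ ∃ kv ∈ laps, kv.1 ∈ gold_paths ∧ p ∈ kv.2 := by
  simp only [gate_hit_dag_py_alt, List.any_eq_true]
  constructor
  · rintro ⟨p, hp, h⟩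
    rw [PySem.Set.contains_iff] at h
    rcases (pvHit_mem _ _ _ _).mp h with h | ⟨kv, hm, h1, h2⟩
    · exact ⟨p, hp, Or.inl ((PySem.Set.mem_ofList _ _).mp h)⟩
    · exact ⟨p, hp, Or.inr ⟨kv, hm, (PySem.Set.mem_ofList _ _).mp h1, h2⟩⟩
  · rintro ⟨p, hp, h⟩
    refine ⟨p, hp, (PySem.Set.contains_iff _ _).mpr ((pvHit_mem _ _ _ _).mpr ?_)⟩
    rcases h with h | ⟨kv, hm, h1, h2⟩
    · exact Or.inl ((PySem.Set.mem_ofList _ _).mpr h)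
    · exact Or.inr ⟨kv, hm, (PySem.Set.mem_ofList _ _).mpr h1, h2⟩

-- ===== VERDICT =====
theorem gate_hit_dag_py_spec : Claim_equal_gate_hit_dag_py := by
  intro gate_paths gold_paths laps _ hpre
  unfold Spec_gate_hit_dag_py
  have key : pvLoopA (PySem.Set.ofList gate_paths) laps gold_paths = gate_hit_dag_py_alt gate_paths gold_paths laps := by
    by_cases hB : gate_hit_dag_py_alt gate_paths gold_paths laps = true
    · rw [hB]
      rcases (alt_iff _ _ _).mp hB with ⟨p, hp, hc⟩
      rw [pvLoopA_iff]
      rcases hc with h | ⟨kv, hkv, h1, h2⟩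
      · exact ⟨p, h, Or.inl ((PySem.Set.mem_ofList _ _).mpr hp)⟩
      · exact ⟨kv.1, h1, Or.inr ⟨p, (pvGetD_mk_iff laps hpre kv.1 p).mpr ⟨kv, hkv, rfl, h2⟩,
          (PySem.Set.mem_ofList _ _).mpr hp⟩⟩
    · rw [Bool.not_eq_true] at hB
      rw [hB, Bool.eq_false_iff]
      intro hA
      rcases (pvLoopA_iff _ _ _).mp hA with ⟨gp, hgp, hc⟩
      have hBt : gate_hit_dag_py_alt gate_paths gold_paths laps = true := by
        rw [alt_iff]
        rcases hc with h | ⟨anc, hanc, hm⟩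
        · exact ⟨gp, (PySem.Set.mem_ofList _ _).mp h, Or.inl hgp⟩
        · rcases (pvGetD_mk_iff laps hpre gp anc).mp hanc with ⟨kv, hkv, hk1, hk2⟩
          exact ⟨anc, (PySem.Set.mem_ofList _ _).mp hm, Or.inr ⟨kv, hkv, hk1 ▸ hgp, hk2⟩⟩
      rw [hB] at hBt; exact absurd hBt (by simp)
  by_cases h0 : PySem.Set.len (PySem.Set.ofList gate_paths) = 0
  · have hgate : gate_paths = [] := by
      have hlen : (PySem.Set.ofList gate_paths).length = 0 := by simpa [PySem.Set.len] using h0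
      rw [List.length_eq_zero_iff] at hlen
      cases gate_paths with
      | nil => rfl
      | cons x xs =>
        exfalso
        have hx : x ∈ PySem.Set.ofList (x :: xs) := (PySem.Set.mem_ofList _ _).mpr List.mem_cons_self
        rw [hlen] at hx; simp at hx
    subst hgate
    simp [gate_hit_dag_py, gate_hit_dag_py_alt]
  · simp only [gate_hit_dag_py]
    rw [if_neg h0]
    exact key
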